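-- pv_equiv track=rewrite | github.com/kistanod/geeks-for-geeks | easy/equal_sum_product.py | solve
-- ===== SOURCE A (Python) =====
-- def product(arr):
--     result = 1
--     for item in arr:
--         result *= item
--     return result
--
-- def solve(arr):
--     count = 0
--     for length in range(1, len(arr) + 1):
--         for index in range(0, len(arr)):
--             temp = arr[index:index + length]
--             if length == len(temp):
--                 if sum(temp) == product(temp):
--                     count += 1
--     return count
-- ===== SOURCE B (Python) =====
-- def solve(arr):
--     count = 0
--     n = len(arr)
--     for i in range(n):
--         s = 0
--         p = 1
--         for x in arr[i:]:
--             s += x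
--             p *= x
--             if s == p:
--                 count += 1
--     return count
-- ===== Notes on version B (the rewrite author's own statement) =====
-- stated objective: faster
-- what changed: Replaced A's triple pass (for every length and start, re-slice and re-scan the subarray to recompute sum and product) by a single incremental pass per start index that extends a running sum and product, so each subarray costs O(1) instead of O(n).
import Mathlib
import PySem

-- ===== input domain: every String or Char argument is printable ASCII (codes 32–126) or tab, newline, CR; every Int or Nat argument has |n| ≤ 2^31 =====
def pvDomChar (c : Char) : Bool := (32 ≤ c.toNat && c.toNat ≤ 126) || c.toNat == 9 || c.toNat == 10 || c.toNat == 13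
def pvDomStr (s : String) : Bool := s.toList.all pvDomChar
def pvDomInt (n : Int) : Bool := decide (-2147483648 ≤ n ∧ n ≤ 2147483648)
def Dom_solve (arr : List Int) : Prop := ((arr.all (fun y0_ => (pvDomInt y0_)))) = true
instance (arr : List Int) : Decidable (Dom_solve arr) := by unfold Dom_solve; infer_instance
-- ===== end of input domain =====

-- B replaces A's O(n^3) slice-per-(length,index) scan by one incremental running sum/product
-- per start index (O(n^2)); objective: faster.

-- ===== PORT A =====
def product (arr : List Int) : Int :=
  arr.foldl (fun result item => result * item) 1

def solve (arr : List Int) : Int :=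
  (PySem.List.pyRange 1 ((arr.length : Int) + 1) 1).foldl (fun count length =>
    (PySem.List.pyRange 0 (arr.length : Int) 1).foldl (fun count index =>
      let temp := PySem.List.slice arr (some index) (some (index + length))
      if length = (temp.length : Int) then
        if temp.sum = product temp then count + 1 else count
      else count) count) 0

-- ===== PORT B =====
def solve_alt (arr : List Int) : Int :=
  (PySem.List.pyRange 0 (arr.length : Int) 1).foldl (fun count i =>
    ((PySem.List.slice arr (some i) none).foldl
      (fun (st : Int × Int × Int) x =>
        let s := st.1 + x
        let p := st.2.1 * x
        (s, p, if s = p then st.2.2 + 1 else st.2.2))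
      (0, 1, count)).2.2) 0

-- ===== PRECONDITION & SPEC =====
def Spec_solve (arr : List Int) (out : Int) : Prop := out = solve_alt arr
instance (arr : List Int) (out : Int) : Decidable (Spec_solve arr out) := by unfold Spec_solve; infer_instance

-- ===== CLAIM (what is proved, stated in full; the proofs are below) =====
def Claim_equal_solve : Prop := ∀ (arr : List Int), Dom_solve arr → Spec_solve arr (solve arr)

-- ===== LEMMAS AND PROOFS =====

-- Counts the nonempty prefixes q of t with s + sum q = p * prod q (loop state of B's inner loop).
def prefCount : List Int → Int → Int → Int
  | [], _, _ => 0
  | x :: t, s, p => (if s + x = p * x then 1 else 0) + prefCount t (s + x) (p * x)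

-- A's per-pair indicator: start j, length k+1.
def aInd (arr : List Int) (j k : Nat) : Int :=
  if j + (k + 1) ≤ arr.length ∧
     ((arr.drop j).take (k + 1)).sum = ((arr.drop j).take (k + 1)).prod then 1 else 0

lemma product_eq_prod (t : List Int) : product t = t.prod := by
  rw [List.prod_eq_foldl]; rfl

lemma foldB (t : List Int) : ∀ s p c : Int,
    (t.foldl (fun (st : Int × Int × Int) x =>
        let s' := st.1 + x
        let p' := st.2.1 * x
        (s', p', if s' = p' then st.2.2 + 1 else st.2.2)) (s, p, c)).2.2
      = c + prefCount t s p := by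
  induction t with
  | nil => intro s p c; simp [prefCount]
  | cons x t ih =>
    intro s p c
    simp only [List.foldl_cons]
    rw [ih]
    simp only [prefCount]
    split_ifs <;> ring

lemma prefCount_eq (t : List Int) : ∀ s p : Int,
    prefCount t s p = ∑ k ∈ Finset.range t.length,
      (if s + (t.take (k + 1)).sum = p * (t.take (k + 1)).prod then (1 : Int) else 0) := by
  induction t with
  | nil => intro s p; simp [prefCount]
  | cons x t ih =>
    intro s p
    rw [prefCount, ih (s + x) (p * x), List.length_cons, Finset.sum_range_succ']
    simp only [List.take_succ_cons, List.sum_cons, List.prod_cons, List.take_zero,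
      List.sum_nil, List.prod_nil, List.sum_cons]
    rw [add_comm]
    congr 1
    · apply Finset.sum_congr rfl
      intro k _
      rw [add_assoc, mul_assoc]
      rfl
    · simp [mul_comm]

lemma innerB (arr : List Int) (j : Nat) (hj : j < arr.length) :
    ∑ k ∈ Finset.range arr.length, aInd arr j k = prefCount (arr.drop j) 0 1 := by
  rw [prefCount_eq]
  have hlen : (arr.drop j).length = arr.length - j := List.length_drop
  rw [hlen]
  have hsub : Finset.range (arr.length - j) ⊆ Finset.range arr.length :=
    by intro x hx; rw [Finset.mem_range] at *; omega
  have hz : ∀ k ∈ Finset.range arr.length, k ∉ Finset.range (arr.length - j) → aInd arr j k = 0 := by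
    intro k _ hk
    rw [Finset.mem_range, not_lt] at hk
    unfold aInd
    have : ¬ (j + (k + 1) ≤ arr.length) := by omega
    simp [this]
  rw [← Finset.sum_subset hsub hz]
  apply Finset.sum_congr rfl
  intro k hk
  rw [Finset.mem_range] at hk
  unfold aInd
  have : j + (k + 1) ≤ arr.length := by omega
  simp [this]

lemma solve_eq (arr : List Int) :
    solve arr = ∑ k ∈ Finset.range arr.length, ∑ j ∈ Finset.range arr.length, aInd arr j k := by
  unfold solve
  rw [PySem.List.pyRange_one 1, PySem.List.pyRange_one 0]
  have h1 : (((arr.length : Int)) + 1 - 1).toNat = arr.length := by omega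
  have h0 : (((arr.length : Int)) - 0).toNat = arr.length := by omega
  rw [h1, h0, List.foldl_map]
  rw [PySem.List.foldl_congr_mem _ _
      (fun count k => count + ∑ j ∈ Finset.range arr.length, aInd arr j k) 0 ?_]
  · rw [PySem.List.foldl_add]
    simp only [zero_add]
    rfl
  · intro count k _
    rw [List.foldl_map]
    rw [PySem.List.foldl_congr_mem _ _ (fun c j => c + aInd arr j k) count ?_]
    · rw [PySem.List.foldl_add]
      congr 1
    · intro c j hj
      have hjn : j < arr.length := List.mem_range.mp hj
      have hsl : PySem.List.slice arr (some (0 + (j : Int))) (some (0 + (j : Int) + (1 + (k : Int))))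
          = (arr.drop j).take (k + 1) := by
        have e1 : (0 : Int) + (j : Int) = ((j : Nat) : Int) := by norm_num
        have e2 : (0 : Int) + (j : Int) + (1 + (k : Int)) = ((j : Nat) : Int) + ((k + 1 : Nat) : Int) := by
          push_cast; ring
        rw [e2, e1, PySem.List.slice_natCast_add]
      have hcond : ((1 + (k : Int)) = (((arr.drop j).take (k + 1)).length : Int))
          ↔ (j + (k + 1) ≤ arr.length) := by
        simp only [List.length_take, List.length_drop]
        omega
      show (let temp := PySem.List.slice arr (some (0 + (j : Int))) (some (0 + (j : Int) + (1 + (k : Int))))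
        if (1 + (k : Int)) = (temp.length : Int) then
          if temp.sum = product temp then c + 1 else c
        else c) = c + aInd arr j k
      simp only [hsl, product_eq_prod]
      unfold aInd
      by_cases hle : j + (k + 1) ≤ arr.length
      · rw [if_pos (hcond.mpr hle)]
        by_cases hg : ((arr.drop j).take (k + 1)).sum = ((arr.drop j).take (k + 1)).prod
        · rw [if_pos hg, if_pos ⟨hle, hg⟩]
        · rw [if_neg hg, if_neg (by tauto), add_zero]
      · rw [if_neg (fun h => hle (hcond.mp h)), if_neg (by tauto), add_zero]

lemma solve_alt_eq (arr : List Int) :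
    solve_alt arr = ∑ j ∈ Finset.range arr.length, prefCount (arr.drop j) 0 1 := by
  unfold solve_alt
  rw [PySem.List.pyRange_one]
  have h0 : (((arr.length : Int)) - 0).toNat = arr.length := by omega
  rw [h0, List.foldl_map]
  rw [PySem.List.foldl_congr_mem _ _ (fun count j => count + prefCount (arr.drop j) 0 1) 0 ?_]
  · rw [PySem.List.foldl_add]
    simp only [zero_add]
    rfl
  · intro count j _
    have hslice : PySem.List.slice arr (some (0 + (j : Int))) none = arr.drop j := by
      rw [PySem.List.slice_from arr (by omega)]
      norm_num
    rw [hslice, foldB]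

-- ===== VERDICT (by name: the statement is the Claim_ definition above) =====
theorem solve_spec : Claim_equal_solve := by
  intro arr _
  unfold Spec_solve
  rw [solve_eq, solve_alt_eq, Finset.sum_comm]
  apply Finset.sum_congr rfl
  intro j hj
  exact innerB arr j (Finset.mem_range.mp hj)
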